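-- pv_equiv track=rewrite | github.com/Yyy1421129/evaluation-pipeline | evaluation/run_evaluation.py | get_task_name
-- ===== SOURCE A (Python) =====
-- TASK_MAP = {
--     "asr": "asr_wer",
--     "ser": "ser_eval",
--     "gr": "gr_eval",
--     "s2tt": "s2tt_eval",
--     "slu": "slu_eval",
--     "sd": "sd_eval",
--     "sa-asr": "sa_asr_eval"
-- }
--
-- TASK_ALIASES = {
--     "asr": ["asr"],
--     "ser": ["ser", "emotion_recognition"],
--     "gr": ["gr", "gender_recognition"],
--     "s2tt": ["s2tt", "translation_ec"],
--     "slu": ["slu", "stress_based_reasoning"],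
--     "sd": ["sd", "speaker_diarization"],
--     "sa-asr": ["sa-asr", "sa_asr"]
-- }
--
-- def get_task_name(task_input):
--     """
--     Get standardized task name, supports case-insensitive and aliases
--     """
--     if not task_input:
--         return None
--
--     task_lower = task_input.lower()
--
--     # Direct match
--     if task_lower in TASK_MAP:
--         return TASK_MAP[task_lower]
--
--     # Alias match
--     for canonical_name, aliases in TASK_ALIASES.items():
--         if task_lower in [alias.lower() for alias in aliases]:
--             return TASK_MAP[canonical_name]
--
--     return None
-- ===== SOURCE B (Python) =====
-- TASK_MAP = {
--     "asr": "asr_wer",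
--     "ser": "ser_eval",
--     "gr": "gr_eval",
--     "s2tt": "s2tt_eval",
--     "slu": "slu_eval",
--     "sd": "sd_eval",
--     "sa-asr": "sa_asr_eval"
-- }
--
-- TASK_ALIASES = {
--     "asr": ["asr"],
--     "ser": ["ser", "emotion_recognition"],
--     "gr": ["gr", "gender_recognition"],
--     "s2tt": ["s2tt", "translation_ec"],
--     "slu": ["slu", "stress_based_reasoning"],
--     "sd": ["sd", "speaker_diarization"],
--     "sa-asr": ["sa-asr", "sa_asr"]
-- }
--
-- # One flattened lookup table, built once at import time: every direct key and
-- # every alias (lowercased) maps straight to the canonical task name.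
-- _FLAT = {}
-- for _canonical, _target in TASK_MAP.items():
--     _FLAT[_canonical.lower()] = _target
--     for _alias in TASK_ALIASES.get(_canonical, []):
--         _FLAT[_alias.lower()] = _target
--
-- def get_task_name(task_input):
--     """
--     Get standardized task name, supports case-insensitive and aliases
--     """
--     if not task_input:
--         return None
--     return _FLAT.get(task_input.lower())
-- ===== Notes on version B (the rewrite author's own statement) =====
-- stated objective: simpler
-- what changed: Replaces the per-call direct-match check plus alias-list scan (rebuilding the lowercased alias lists on every call) with one flattened dict built once at import time, so the function body is a single lookup.
import Mathlib
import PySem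

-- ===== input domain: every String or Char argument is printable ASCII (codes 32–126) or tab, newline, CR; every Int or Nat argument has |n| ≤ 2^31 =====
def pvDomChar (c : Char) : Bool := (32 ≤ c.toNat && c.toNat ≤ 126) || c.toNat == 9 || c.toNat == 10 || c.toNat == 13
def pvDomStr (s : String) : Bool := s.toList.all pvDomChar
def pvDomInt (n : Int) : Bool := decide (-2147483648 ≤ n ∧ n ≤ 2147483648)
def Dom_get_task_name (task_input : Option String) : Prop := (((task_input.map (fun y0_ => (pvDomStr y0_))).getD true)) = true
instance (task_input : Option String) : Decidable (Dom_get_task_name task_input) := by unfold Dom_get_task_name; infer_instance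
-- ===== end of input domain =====

-- B builds one flattened alias→canonical dict at module load, so the call is a single lookup (objective: simpler).

-- ===== PORT A =====
def taskMapA : PySem.Dict String String := PySem.Dict.ofList
  [("asr","asr_wer"),("ser","ser_eval"),("gr","gr_eval"),("s2tt","s2tt_eval"),
   ("slu","slu_eval"),("sd","sd_eval"),("sa-asr","sa_asr_eval")]

def taskAliasesA : PySem.Dict String (List String) := PySem.Dict.ofList
  [("asr",["asr"]),("ser",["ser","emotion_recognition"]),("gr",["gr","gender_recognition"]),
   ("s2tt",["s2tt","translation_ec"]),("slu",["slu","stress_based_reasoning"]),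
   ("sd",["sd","speaker_diarization"]),("sa-asr",["sa-asr","sa_asr"])]

-- the 'for canonical_name, aliases in TASK_ALIASES.items()' loop with its early return
def aliasLoopA (task_lower : String) : List (String × List String) → Option String
  | [] => none
  | (canonical_name, aliases) :: rest =>
      if (aliases.map PySem.Str.lower).contains task_lower then
        taskMapA.get? canonical_name
      else aliasLoopA task_lower rest

def get_task_name (task_input : Option String) : Option String :=
  match task_input with
  | none => none
  | some s =>
      if s = "" then none
      else
        let task_lower := PySem.Str.lower s
        if taskMapA.contains task_lower then taskMapA.get? task_lower
        else aliasLoopA task_lower taskAliasesA.items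

-- ===== PORT B =====
-- the module-level _FLAT-building loops of Source B
def flatB : PySem.Dict String String :=
  taskMapA.items.foldl
    (fun d p =>
      (taskAliasesA.getD p.1 []).foldl
        (fun d a => d.insert (PySem.Str.lower a) p.2)
        (d.insert (PySem.Str.lower p.1) p.2))
    PySem.Dict.empty

def get_task_name_alt (task_input : Option String) : Option String :=
  match task_input with
  | none => none
  | some s => if s = "" then none else flatB.get? (PySem.Str.lower s)

-- ===== PRECONDITION & SPEC =====
def Spec_get_task_name (task_input : Option String) (out : Option String) : Prop := out = get_task_name_alt task_input
instance (task_input : Option String) (out : Option String) : Decidable (Spec_get_task_name task_input out) := by unfold Spec_get_task_name; infer_instance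

-- ===== CLAIM (what is proved, stated in full; the proofs are below) =====
def Claim_equal_get_task_name : Prop := ∀ (task_input : Option String), Dom_get_task_name task_input → Spec_get_task_name task_input (get_task_name task_input)

-- ===== LEMMAS AND PROOFS =====

-- The core fact: for every lowered string, A's direct-match-then-alias-scan equals a lookup in B's flat table.
theorem core_eq (t : String) :
    (if taskMapA.contains t then taskMapA.get? t else aliasLoopA t taskAliasesA.items)
      = flatB.get? t := by
  by_cases h0 : t = "asr"
  · subst h0; decide
  by_cases h1 : t = "ser"
  · subst h1; decide
  by_cases h2 : t = "emotion_recognition"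
  · subst h2; decide
  by_cases h3 : t = "gr"
  · subst h3; decide
  by_cases h4 : t = "gender_recognition"
  · subst h4; decide
  by_cases h5 : t = "s2tt"
  · subst h5; decide
  by_cases h6 : t = "translation_ec"
  · subst h6; decide
  by_cases h7 : t = "slu"
  · subst h7; decide
  by_cases h8 : t = "stress_based_reasoning"
  · subst h8; decide
  by_cases h9 : t = "sd"
  · subst h9; decide
  by_cases h10 : t = "speaker_diarization"
  · subst h10; decide
  by_cases h11 : t = "sa-asr"
  · subst h11; decide
  by_cases h12 : t = "sa_asr"
  · subst h12; decide
  have hmap : taskMapA = PySem.Dict.mk [("asr","asr_wer"),("ser","ser_eval"),("gr","gr_eval"),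
      ("s2tt","s2tt_eval"),("slu","slu_eval"),("sd","sd_eval"),("sa-asr","sa_asr_eval")] := by rfl
  have hal : taskAliasesA.items = [("asr",["asr"]),("ser",["ser","emotion_recognition"]),
      ("gr",["gr","gender_recognition"]),("s2tt",["s2tt","translation_ec"]),
      ("slu",["slu","stress_based_reasoning"]),("sd",["sd","speaker_diarization"]),
      ("sa-asr",["sa-asr","sa_asr"])] := by rfl
  have hflat : flatB = PySem.Dict.mk [("asr", "asr_wer"), ("ser", "ser_eval"),
      ("emotion_recognition", "ser_eval"), ("gr", "gr_eval"), ("gender_recognition", "gr_eval"),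
      ("s2tt", "s2tt_eval"), ("translation_ec", "s2tt_eval"), ("slu", "slu_eval"),
      ("stress_based_reasoning", "slu_eval"), ("sd", "sd_eval"), ("speaker_diarization", "sd_eval"),
      ("sa-asr", "sa_asr_eval"), ("sa_asr", "sa_asr_eval")] := by rfl
  have e0 : ("asr" == t) = false := beq_eq_false_iff_ne.mpr (fun h => h0 h.symm)
  have f0 : (t == "asr") = false := beq_eq_false_iff_ne.mpr h0
  have e1 : ("ser" == t) = false := beq_eq_false_iff_ne.mpr (fun h => h1 h.symm)
  have f1 : (t == "ser") = false := beq_eq_false_iff_ne.mpr h1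
  have e2 : ("emotion_recognition" == t) = false := beq_eq_false_iff_ne.mpr (fun h => h2 h.symm)
  have f2 : (t == "emotion_recognition") = false := beq_eq_false_iff_ne.mpr h2
  have e3 : ("gr" == t) = false := beq_eq_false_iff_ne.mpr (fun h => h3 h.symm)
  have f3 : (t == "gr") = false := beq_eq_false_iff_ne.mpr h3
  have e4 : ("gender_recognition" == t) = false := beq_eq_false_iff_ne.mpr (fun h => h4 h.symm)
  have f4 : (t == "gender_recognition") = false := beq_eq_false_iff_ne.mpr h4
  have e5 : ("s2tt" == t) = false := beq_eq_false_iff_ne.mpr (fun h => h5 h.symm)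
  have f5 : (t == "s2tt") = false := beq_eq_false_iff_ne.mpr h5
  have e6 : ("translation_ec" == t) = false := beq_eq_false_iff_ne.mpr (fun h => h6 h.symm)
  have f6 : (t == "translation_ec") = false := beq_eq_false_iff_ne.mpr h6
  have e7 : ("slu" == t) = false := beq_eq_false_iff_ne.mpr (fun h => h7 h.symm)
  have f7 : (t == "slu") = false := beq_eq_false_iff_ne.mpr h7
  have e8 : ("stress_based_reasoning" == t) = false := beq_eq_false_iff_ne.mpr (fun h => h8 h.symm)
  have f8 : (t == "stress_based_reasoning") = false := beq_eq_false_iff_ne.mpr h8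
  have e9 : ("sd" == t) = false := beq_eq_false_iff_ne.mpr (fun h => h9 h.symm)
  have f9 : (t == "sd") = false := beq_eq_false_iff_ne.mpr h9
  have e10 : ("speaker_diarization" == t) = false := beq_eq_false_iff_ne.mpr (fun h => h10 h.symm)
  have f10 : (t == "speaker_diarization") = false := beq_eq_false_iff_ne.mpr h10
  have e11 : ("sa-asr" == t) = false := beq_eq_false_iff_ne.mpr (fun h => h11 h.symm)
  have f11 : (t == "sa-asr") = false := beq_eq_false_iff_ne.mpr h11
  have e12 : ("sa_asr" == t) = false := beq_eq_false_iff_ne.mpr (fun h => h12 h.symm)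
  have f12 : (t == "sa_asr") = false := beq_eq_false_iff_ne.mpr h12
  have l0 : PySem.Str.lower "asr" = "asr" := rfl
  have l1 : PySem.Str.lower "ser" = "ser" := rfl
  have l2 : PySem.Str.lower "emotion_recognition" = "emotion_recognition" := rfl
  have l3 : PySem.Str.lower "gr" = "gr" := rfl
  have l4 : PySem.Str.lower "gender_recognition" = "gender_recognition" := rfl
  have l5 : PySem.Str.lower "s2tt" = "s2tt" := rfl
  have l6 : PySem.Str.lower "translation_ec" = "translation_ec" := rfl
  have l7 : PySem.Str.lower "slu" = "slu" := rfl
  have l8 : PySem.Str.lower "stress_based_reasoning" = "stress_based_reasoning" := rfl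
  have l9 : PySem.Str.lower "sd" = "sd" := rfl
  have l10 : PySem.Str.lower "speaker_diarization" = "speaker_diarization" := rfl
  have l11 : PySem.Str.lower "sa-asr" = "sa-asr" := rfl
  have l12 : PySem.Str.lower "sa_asr" = "sa_asr" := rfl
  rw [hflat, hmap, hal]
  simp only [aliasLoopA, PySem.Dict.contains_mk, PySem.Dict.get?_mk_cons,
    List.any_cons, List.any_nil, List.map, List.contains, List.elem]
  simp [l0, l1, l2, l3, l4, l5, l6, l7, l8, l9, l10, l11, l12, e0, f0, e1, f1, e2, f2, e3, f3, e4, f4, e5, f5, e6, f6, e7, f7, e8, f8, e9, f9, e10, f10, e11, f11, e12, f12, PySem.Dict.get?]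

-- ===== VERDICT (by name: the statement is the Claim_ definition above) =====
theorem get_task_name_spec : Claim_equal_get_task_name := by
  intro ti _
  unfold Spec_get_task_name get_task_name get_task_name_alt
  match ti with
  | none => rfl
  | some s =>
      simp only
      by_cases h : s = ""
      · simp [h]
      · simp only [if_neg h]
        exact core_eq (PySem.Str.lower s)
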